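-- pv_equiv track=rewrite | github.com/echo-xiao/leetcode-journey | Problems/1764_maximum-repeating-substring/solution_3.py | maxRepeating
-- ===== SOURCE A (Python) =====
-- def maxRepeating(sequence: str, word: str) -> int:
--     n = len(sequence)
--     m = len(word)
--     k = 0
--
--     left = 0
--     right = 0
--
--     while left < n:
--         curr = 0
--         right = left
--
--         while right + m <= n:
--             if sequence[right: right+m] == word:
--                 curr += 1
--                 right += m
--             else:
--                 break
--         k = max(k, curr)
--         left += 1
--     return k
-- ===== SOURCE B (Python) =====
-- def maxRepeating(sequence: str, word: str) -> int:
--     n, m = len(sequence), len(word)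
--     if m == 0:
--         return 0
--     dp = {}
--     best = 0
--     for i in range(n - m, -1, -1):
--         if sequence[i:i + m] == word:
--             v = dp.get(i + m, 0) + 1
--             dp[i] = v
--             if v > best:
--                 best = v
--     return best
-- ===== Notes on version B (the rewrite author's own statement) =====
-- stated objective: faster
-- what changed: A re-scans greedily from every start position (nested loops); B makes one right-to-left pass with a dictionary dp[i] = consecutive copies of word starting at i (dp[i] = dp.get(i+m,0)+1 on a match), so each position is compared against word once.
-- outside the precondition, e.g. on maxRepeating('ab', ''): A does not finish within the time limit, B returns 0
import Mathlib
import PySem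

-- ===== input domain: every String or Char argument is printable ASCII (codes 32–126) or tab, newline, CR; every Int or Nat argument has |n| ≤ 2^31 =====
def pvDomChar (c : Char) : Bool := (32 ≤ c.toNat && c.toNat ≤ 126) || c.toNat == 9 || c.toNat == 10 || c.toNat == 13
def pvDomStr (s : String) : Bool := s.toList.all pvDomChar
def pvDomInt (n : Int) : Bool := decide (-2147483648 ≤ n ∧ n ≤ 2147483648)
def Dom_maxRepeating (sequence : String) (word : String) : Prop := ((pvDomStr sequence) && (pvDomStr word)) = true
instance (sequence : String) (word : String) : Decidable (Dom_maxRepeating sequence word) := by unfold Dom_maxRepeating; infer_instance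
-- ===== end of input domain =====

-- B replaces A's quadratic restart-from-every-position scan by one right-to-left pass with a
-- dictionary dp[i] = number of consecutive copies of word starting at i (objective: faster).


-- ===== PORT A =====
-- inner 'while right + m <= n' loop of A; fuel bounds the iteration count (the loop runs at
-- most n+1 times whenever m ≥ 1; for m = 0 Python diverges, excluded by Pre_).
def innerA (s w : List Char) (n m : Nat) : Nat → Nat → Nat → Nat
  | 0, _, curr => curr
  | fuel + 1, right, curr =>
    if right + m ≤ n then
      if PySem.List.slice s (some (right : Int)) (some ((right : Int) + (m : Int))) = w then
        innerA s w n m fuel (right + m) (curr + 1)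
      else curr
    else curr

def maxRepeating (sequence : String) (word : String) : Int :=
  let s := sequence.toList
  let w := word.toList
  let n := s.length
  let m := w.length
  let k := (List.range n).foldl (fun k left => max k (innerA s w n m (n + 1) left 0)) 0
  (k : Int)

-- ===== PORT B =====
def maxRepeating_alt (sequence : String) (word : String) : Int :=
  let s := sequence.toList
  let w := word.toList
  let n := s.length
  let m := w.length
  if m = 0 then 0
  else
    ((PySem.List.pyRange ((n : Int) - (m : Int)) (-1) (-1)).foldl
      (fun (st : PySem.Dict Int Int × Int) (i : Int) =>
        if PySem.List.slice s (some i) (some (i + (m : Int))) = w then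
          let v := st.1.getD (i + (m : Int)) 0 + 1
          (st.1.insert i v, if v > st.2 then v else st.2)
        else st)
      (PySem.Dict.empty, 0)).2

-- ===== PRECONDITION & SPEC =====
-- Pre_ excludes word = "" with a nonempty sequence: there A's inner loop never advances
-- (right += 0) and the Python diverges, returning nothing to match.
def Pre_maxRepeating (sequence : String) (word : String) : Prop :=
  word ≠ "" ∨ sequence = ""
instance (sequence : String) (word : String) : Decidable (Pre_maxRepeating sequence word) := by
  unfold Pre_maxRepeating; infer_instance

def pvWitness_maxRepeating : String × String := ("abababa", "ab")

def Spec_maxRepeating (sequence : String) (word : String) (out : Int) : Prop := out = maxRepeating_alt sequence word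
instance (sequence : String) (word : String) (out : Int) : Decidable (Spec_maxRepeating sequence word out) := by unfold Spec_maxRepeating; infer_instance

-- ===== CLAIM (what is proved, stated in full; the proofs are below) =====
def Claim_equal_maxRepeating : Prop := ∀ (sequence : String) (word : String), Dom_maxRepeating sequence word → Pre_maxRepeating sequence word → Spec_maxRepeating sequence word (maxRepeating sequence word)

-- ===== LEMMAS AND PROOFS =====

-- number of consecutive copies of w (length m) in s (length n) starting at index i
def cnt (s w : List Char) (n m i : Nat) : Nat :=
  if h : 0 < m ∧ i + m ≤ n ∧ (s.drop i).take m = w then cnt s w n m (i + m) + 1 else 0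
termination_by n - i
decreasing_by omega

-- running maximum of cnt over indices j-1, …, 0
def bestOf (s w : List Char) (n m : Nat) : Nat → Nat
  | 0 => 0
  | j + 1 => max (cnt s w n m j) (bestOf s w n m j)

lemma cnt_eq_zero (s w : List Char) (n m i : Nat) (h : n < i + m) : cnt s w n m i = 0 := by
  rw [cnt]; rw [dif_neg]; omega

lemma innerA_eq_cnt (s w : List Char) (n m : Nat) (hm : 0 < m) :
    ∀ fuel i c, n - i < fuel → innerA s w n m fuel i c = c + cnt s w n m i := by
  intro fuel
  induction fuel with
  | zero => intro i c h; omega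
  | succ fuel ih =>
    intro i c h
    rw [innerA, PySem.List.slice_natCast_add]
    by_cases h1 : i + m ≤ n
    · by_cases h2 : (s.drop i).take m = w
      · rw [if_pos h1, if_pos h2, ih (i + m) (c + 1) (by omega)]
        conv_rhs => rw [cnt]
        rw [dif_pos ⟨hm, h1, h2⟩]; omega
      · rw [if_pos h1, if_neg h2]
        conv_rhs => rw [cnt]
        rw [dif_neg (by tauto)]
        omega
    · rw [if_neg h1]
      conv_rhs => rw [cnt]
      rw [dif_neg (by tauto)]
      omega

lemma foldA_eq_bestOf (s w : List Char) (n m : Nat) (hm : 0 < m) (j : Nat) :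
    (List.range j).foldl (fun k left => max k (innerA s w n m (n + 1) left 0)) 0
      = bestOf s w n m j := by
  induction j with
  | zero => rfl
  | succ j ih =>
    rw [List.range_succ, List.foldl_append, List.foldl_cons, List.foldl_nil, ih,
      innerA_eq_cnt s w n m hm (n + 1) j 0 (by omega)]
    simp [bestOf]; omega

lemma bestOf_stable (s w : List Char) (n m j0 : Nat)
    (h0 : ∀ t, j0 ≤ t → n < t + m) :
    ∀ j, j0 ≤ j → bestOf s w n m j = bestOf s w n m j0 := by
  intro j
  induction j with
  | zero => intro h; have : j0 = 0 := by omega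
            rw [this]
  | succ j ih =>
    intro h
    rcases Nat.eq_or_lt_of_le h with h' | h'
    · rw [h']
    · rw [bestOf, cnt_eq_zero s w n m j (h0 j (by omega)), ih (by omega)]
      simp

lemma loopB_eq (s w : List Char) (n m : Nat) (hm : 0 < m) (hmn : m ≤ n) :
    ∀ j : Nat, j ≤ n - m + 1 → ∀ (dp : PySem.Dict Int Int) (best : Int), 0 ≤ best →
    (∀ t : Nat, dp.getD (t : Int) 0 = if j ≤ t then (cnt s w n m t : Int) else 0) →
    ((PySem.List.pyRange ((j : Int) - 1) (-1) (-1)).foldl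
      (fun (st : PySem.Dict Int Int × Int) (i : Int) =>
        if PySem.List.slice s (some i) (some (i + (m : Int))) = w then
          let v := st.1.getD (i + (m : Int)) 0 + 1
          (st.1.insert i v, if v > st.2 then v else st.2)
        else st)
      (dp, best)).2 = max best (bestOf s w n m j : Int) := by
  intro j
  induction j with
  | zero =>
    intro _ dp best hbest _
    rw [PySem.List.pyRange_neg_one_eq_nil (by omega), List.foldl_nil]
    simp [bestOf]
    omega
  | succ j ih =>
    intro hj dp best hbest hinv
    rw [show ((j + 1 : Nat) : Int) - 1 = (j : Int) by push_cast; ring,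
      PySem.List.pyRange_neg_one_cons (by omega)]
    simp only [List.foldl_cons]
    have hslice : PySem.List.slice s (some (j : Int)) (some ((j : Int) + (m : Int)))
        = (s.drop j).take m := PySem.List.slice_natCast_add s j m
    rw [hslice]
    by_cases h2 : (s.drop j).take m = w
    · rw [if_pos h2]
      have hcntj : cnt s w n m j = cnt s w n m (j + m) + 1 := by
        conv_lhs => rw [cnt]
        rw [dif_pos ⟨hm, by omega, h2⟩]
      have hget : dp.getD ((j : Int) + (m : Int)) 0 = (cnt s w n m (j + m) : Int) := by
        have h := hinv (j + m)
        rw [if_pos (by omega)] at h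
        rw [show ((j : Int) + (m : Int)) = ((j + m : Nat) : Int) by push_cast; ring, h]
      simp only [hget]
      have hC : (cnt s w n m (j + m) : Int) + 1 = (cnt s w n m j : Int) := by
        rw [hcntj]; push_cast; ring
      rw [hC]
      have hbest' : (0 : Int) ≤ if (cnt s w n m j : Int) > best then (cnt s w n m j : Int) else best := by
        split_ifs <;> omega
      have hinv' : ∀ t : Nat, (dp.insert (j : Int) (cnt s w n m j : Int)).getD (t : Int) 0
          = if j ≤ t then (cnt s w n m t : Int) else 0 := by
        intro t
        rw [PySem.Dict.getD_insert]
        by_cases ht : (t : Int) = (j : Int)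
        · have htj : t = j := by exact_mod_cast ht
          rw [if_pos ht, if_pos (Nat.le_of_eq htj.symm), htj]
        · have htj : t ≠ j := by intro hh; exact ht (by exact_mod_cast hh)
          rw [if_neg ht, hinv t]
          by_cases hjt : j + 1 ≤ t
          · rw [if_pos hjt, if_pos (by omega)]
          · rw [if_neg hjt, if_neg (by omega)]
      rw [ih (by omega) _ _ hbest' hinv']
      rw [bestOf]
      push_cast
      split_ifs <;> omega
    · rw [if_neg h2]
      have hcntj : cnt s w n m j = 0 := by
        rw [cnt, dif_neg (by tauto)]
      have hinv' : ∀ t : Nat, dp.getD (t : Int) 0 = if j ≤ t then (cnt s w n m t : Int) else 0 := by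
        intro t
        rw [hinv t]
        by_cases hjt : j + 1 ≤ t
        · rw [if_pos hjt, if_pos (by omega)]
        · by_cases hjt' : j ≤ t
          · have ht : t = j := by omega
            rw [if_neg hjt, if_pos hjt', ht, hcntj]; simp
          · rw [if_neg hjt, if_neg hjt']
      rw [ih (by omega) dp best hbest hinv']
      rw [bestOf, hcntj]
      simp

lemma empty_inv (s w : List Char) (n m : Nat) (hmn : m ≤ n) :
    ∀ t : Nat, (PySem.Dict.empty : PySem.Dict Int Int).getD (t : Int) 0
      = if n - m + 1 ≤ t then (cnt s w n m t : Int) else 0 := by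
  intro t
  by_cases h : n - m + 1 ≤ t
  · rw [if_pos h, cnt_eq_zero s w n m t (by omega)]
    rfl
  · rw [if_neg h]; rfl

-- the whole equivalence, stated on the underlying character lists
lemma main_lists (s w : List Char) (hpre : w ≠ [] ∨ s = []) :
    (((List.range s.length).foldl
        (fun k left => max k (innerA s w s.length w.length (s.length + 1) left 0)) 0 : Nat) : Int)
      = (if w.length = 0 then 0 else
          ((PySem.List.pyRange ((s.length : Int) - (w.length : Int)) (-1) (-1)).foldl
            (fun (st : PySem.Dict Int Int × Int) (i : Int) =>
              if PySem.List.slice s (some i) (some (i + (w.length : Int))) = w then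
                let v := st.1.getD (i + (w.length : Int)) 0 + 1
                (st.1.insert i v, if v > st.2 then v else st.2)
              else st)
            (PySem.Dict.empty, 0)).2) := by
  set n := s.length with hn
  set m := w.length with hm
  rcases Nat.eq_zero_or_pos m with hm0 | hmpos
  · have hwnil : w = [] := List.length_eq_zero_iff.mp hm0
    have hsnil : s = [] := by
      rcases hpre with h | h
      · exact absurd hwnil h
      · exact h
    rw [if_pos hm0]
    have hn0 : n = 0 := by rw [hn, hsnil]; rfl
    rw [hn0]
    rfl
  · rw [if_neg (by omega)]
    rw [foldA_eq_bestOf s w n m hmpos n]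
    by_cases hmn : m ≤ n
    · have h := loopB_eq s w n m hmpos hmn (n - m + 1) (by omega)
        PySem.Dict.empty 0 (by omega) (empty_inv s w n m hmn)
      rw [show (((n - m + 1 : Nat) : Int) - 1) = ((n : Int) - (m : Int)) by
        push_cast [hmn]; ring] at h
      rw [h]
      rw [bestOf_stable s w n m (n - m + 1) (by omega) n (by omega)]
      simp
    · rw [PySem.List.pyRange_neg_one_eq_nil (by omega), List.foldl_nil]
      have h := bestOf_stable s w n m 0 (by omega) n (by omega)
      rw [h]
      rfl

-- ===== VERDICT (by name: the statement is the Claim_ definition above) =====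
theorem maxRepeating_spec : Claim_equal_maxRepeating := by
  intro sequence word _ hpre
  unfold Spec_maxRepeating
  have hpre' : word.toList ≠ [] ∨ sequence.toList = [] := by
    rcases hpre with h | h
    · left; intro hnil; exact h (String.toList_eq_nil_iff.mp hnil)
    · right; rw [h]; rfl
  exact main_lists sequence.toList word.toList hpre'
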